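-- pv_equiv track=rewrite | github.com/VyacheslavZalygin/PyEducation2021 | Inf/test25/p4.py | func
-- ===== SOURCE A (Python) =====
-- def func(N):
--   m, n = 0, 0
--   while N % 2 == 0 and m < 12:
--     N //= 2
--     m += 1
--   if not(2 < m < 12): return False
--   while N % 3 == 0 and n < 10:
--     N //= 3
--     n += 1
--   if not(1 < n < 10): return False
--   return N == 1
-- ===== SOURCE B (Python) =====
-- def func(N):
--     return any(2**m * 3**n == N
--                for m in range(3, 12)
--                for n in range(2, 10))
-- ===== Notes on version B (the rewrite author's own statement) =====
-- stated objective: simpler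
-- what changed: Replaces the two divide-down factoring loops with a generate-and-test enumeration of the finitely many candidate products 2^m*3^n (m in 3..11, n in 2..9) compared against N.
import Mathlib
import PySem

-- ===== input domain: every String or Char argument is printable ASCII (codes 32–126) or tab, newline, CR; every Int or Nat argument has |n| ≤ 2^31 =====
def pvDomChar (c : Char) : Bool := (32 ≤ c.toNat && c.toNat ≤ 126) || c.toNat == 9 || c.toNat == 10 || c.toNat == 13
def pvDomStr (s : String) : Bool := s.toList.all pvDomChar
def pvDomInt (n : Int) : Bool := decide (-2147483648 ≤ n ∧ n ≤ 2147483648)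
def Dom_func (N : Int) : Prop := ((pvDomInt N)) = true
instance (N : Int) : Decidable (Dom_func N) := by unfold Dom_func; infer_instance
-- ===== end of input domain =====

-- B replaces A's two divide-down factoring loops by enumerating the 72 candidate
-- products 2^m*3^n (m in 3..11, n in 2..9) and comparing each against N (objective: simpler).

-- ===== PORT A =====
-- while N % 2 == 0 and m < 12: N //= 2; m += 1
def funcLoop2 (N : Int) (m : Int) : Int × Int :=
  if PySem.Int.mod N 2 = 0 ∧ m < 12 then
    funcLoop2 (PySem.Int.floordiv N 2) (m + 1)
  else (N, m)
termination_by (12 - m).toNat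
decreasing_by omega

-- while N % 3 == 0 and n < 10: N //= 3; n += 1
def funcLoop3 (N : Int) (n : Int) : Int × Int :=
  if PySem.Int.mod N 3 = 0 ∧ n < 10 then
    funcLoop3 (PySem.Int.floordiv N 3) (n + 1)
  else (N, n)
termination_by (10 - n).toNat
decreasing_by omega

def func (N : Int) : Bool :=
  let r2 := funcLoop2 N 0
  if ¬(2 < r2.2 ∧ r2.2 < 12) then false
  else
    let r3 := funcLoop3 r2.1 0
    if ¬(1 < r3.2 ∧ r3.2 < 10) then false
    else r3.1 == 1

-- ===== PORT B =====
def func_alt (N : Int) : Bool :=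
  (PySem.List.pyRange 3 12 1).any fun m =>
    (PySem.List.pyRange 2 10 1).any fun n =>
      (2 : Int) ^ m.toNat * 3 ^ n.toNat == N

-- ===== PRECONDITION & SPEC =====
def Spec_func (N : Int) (out : Bool) : Prop := out = func_alt N
instance (N : Int) (out : Bool) : Decidable (Spec_func N out) := by unfold Spec_func; infer_instance

-- ===== CLAIM (what is proved, stated in full; the proofs are below) =====
def Claim_equal_func : Prop := ∀ (N : Int), Dom_func N → Spec_func N (func N)

-- ===== LEMMAS AND PROOFS =====

theorem floordiv_two_of_dvd (N : Int) (h : 2 ∣ N) : PySem.Int.floordiv N 2 * 2 = N := by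
  rw [PySem.Int.floordiv_eq_ediv_of_pos (by omega)]
  exact Int.ediv_mul_cancel h

theorem floordiv_three_of_dvd (N : Int) (h : 3 ∣ N) : PySem.Int.floordiv N 3 * 3 = N := by
  rw [PySem.Int.floordiv_eq_ediv_of_pos (by omega)]
  exact Int.ediv_mul_cancel h

-- invariant of A's first loop: it only divided out 2s, ended odd or at the cap
theorem funcLoop2_inv (N m : Int) (hm : m ≤ 12) :
    (funcLoop2 N m).1 * 2 ^ ((funcLoop2 N m).2 - m).toNat = N ∧
    m ≤ (funcLoop2 N m).2 ∧ (funcLoop2 N m).2 ≤ 12 ∧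
    ((funcLoop2 N m).2 < 12 → ¬ (2 ∣ (funcLoop2 N m).1)) := by
  fun_induction funcLoop2 N m with
  | case1 N m h ih =>
    obtain ⟨hmod, hlt⟩ := h
    have hdvd : (2:Int) ∣ N := (PySem.Int.mod_eq_zero_iff_dvd N 2).mp hmod
    obtain ⟨h1, h2, h3, h4⟩ := ih (by omega)
    refine ⟨?_, by omega, h3, h4⟩
    have he : ((funcLoop2 (PySem.Int.floordiv N 2) (m+1)).2 - m).toNat
        = ((funcLoop2 (PySem.Int.floordiv N 2) (m+1)).2 - (m+1)).toNat + 1 := by omega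
    rw [he, pow_succ, ← mul_assoc, h1, floordiv_two_of_dvd N hdvd]
  | case2 N m h =>
    simp only
    refine ⟨by simp, le_refl m, hm, fun _ h2 => ?_⟩
    exact (not_and_or.mp h).elim (fun hc => hc ((PySem.Int.mod_eq_zero_iff_dvd N 2).mpr h2)) (fun hc => hc (by omega))

-- invariant of A's second loop
theorem funcLoop3_inv (N n : Int) (hn : n ≤ 10) :
    (funcLoop3 N n).1 * 3 ^ ((funcLoop3 N n).2 - n).toNat = N ∧
    n ≤ (funcLoop3 N n).2 ∧ (funcLoop3 N n).2 ≤ 10 ∧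
    ((funcLoop3 N n).2 < 10 → ¬ (3 ∣ (funcLoop3 N n).1)) := by
  fun_induction funcLoop3 N n with
  | case1 N n h ih =>
    obtain ⟨hmod, hlt⟩ := h
    have hdvd : (3:Int) ∣ N := (PySem.Int.mod_eq_zero_iff_dvd N 3).mp hmod
    obtain ⟨h1, h2, h3, h4⟩ := ih (by omega)
    refine ⟨?_, by omega, h3, h4⟩
    have he : ((funcLoop3 (PySem.Int.floordiv N 3) (n+1)).2 - n).toNat
        = ((funcLoop3 (PySem.Int.floordiv N 3) (n+1)).2 - (n+1)).toNat + 1 := by omega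
    rw [he, pow_succ, ← mul_assoc, h1, floordiv_three_of_dvd N hdvd]
  | case2 N n h =>
    simp only
    refine ⟨by simp, le_refl n, hn, fun _ h2 => ?_⟩
    exact (not_and_or.mp h).elim (fun hc => hc ((PySem.Int.mod_eq_zero_iff_dvd N 3).mpr h2)) (fun hc => hc (by omega))

-- A's first loop on an exact product strips all the 2s
theorem funcLoop2_shift (k : Nat) (M m : Int) (hM : ¬ (2 ∣ M)) (h : m + k ≤ 12) :
    funcLoop2 (M * 2 ^ k) m = (M, m + k) := by
  induction k generalizing m with
  | zero =>
    rw [funcLoop2, if_neg]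
    · simp
    · intro ⟨hmod, _⟩
      exact hM (by simpa using (PySem.Int.mod_eq_zero_iff_dvd M 2).mp (by simpa using hmod))
  | succ k ih =>
    rw [funcLoop2, if_pos]
    · have hd : PySem.Int.floordiv (M * 2 ^ (k+1)) 2 = M * 2 ^ k := by
        rw [PySem.Int.floordiv_eq_ediv_of_pos (by omega), pow_succ, ← mul_assoc]
        exact Int.mul_ediv_cancel _ (by omega)
      rw [hd, ih (m+1) (by omega)]
      congr 1; push_cast; ring
    · refine ⟨(PySem.Int.mod_eq_zero_iff_dvd _ 2).mpr ⟨M * 2^k, by ring⟩, by omega⟩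

theorem funcLoop3_shift (k : Nat) (M n : Int) (hM : ¬ (3 ∣ M)) (h : n + k ≤ 10) :
    funcLoop3 (M * 3 ^ k) n = (M, n + k) := by
  induction k generalizing n with
  | zero =>
    rw [funcLoop3, if_neg]
    · simp
    · intro ⟨hmod, _⟩
      exact hM (by simpa using (PySem.Int.mod_eq_zero_iff_dvd M 3).mp (by simpa using hmod))
  | succ k ih =>
    rw [funcLoop3, if_pos]
    · have hd : PySem.Int.floordiv (M * 3 ^ (k+1)) 3 = M * 3 ^ k := by
        rw [PySem.Int.floordiv_eq_ediv_of_pos (by omega), pow_succ, ← mul_assoc]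
        exact Int.mul_ediv_cancel _ (by omega)
      rw [hd, ih (n+1) (by omega)]
      congr 1; push_cast; ring
    · refine ⟨(PySem.Int.mod_eq_zero_iff_dvd _ 3).mpr ⟨M * 3^k, by ring⟩, by omega⟩

theorem func_alt_iff (N : Int) :
    func_alt N = true ↔ ∃ a b : Nat, 3 ≤ a ∧ a ≤ 11 ∧ 2 ≤ b ∧ b ≤ 9 ∧
      (2 : Int) ^ a * 3 ^ b = N := by
  simp only [func_alt, List.any_eq_true, PySem.List.mem_pyRange_one, beq_iff_eq]
  constructor
  · rintro ⟨m, ⟨h3, h12⟩, n, ⟨h2, h10⟩, heq⟩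
    exact ⟨m.toNat, n.toNat, by omega, by omega, by omega, by omega, heq⟩
  · rintro ⟨a, b, h3, h11, h2, h9, heq⟩
    refine ⟨(a : Int), ⟨by omega, by omega⟩, (b : Int), ⟨by omega, by omega⟩, ?_⟩
    simpa using heq

theorem func_iff (N : Int) :
    func N = true ↔ ∃ a b : Nat, 3 ≤ a ∧ a ≤ 11 ∧ 2 ≤ b ∧ b ≤ 9 ∧
      (2 : Int) ^ a * 3 ^ b = N := by
  constructor
  · intro h
    simp only [func] at h
    split_ifs at h with h2 h3
    obtain ⟨i2a, i2b, i2c, i2d⟩ := funcLoop2_inv N 0 (by norm_num)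
    obtain ⟨i3a, i3b, i3c, i3d⟩ := funcLoop3_inv (funcLoop2 N 0).1 0 (by norm_num)
    rw [beq_iff_eq] at h
    refine ⟨(funcLoop2 N 0).2.toNat, (funcLoop3 (funcLoop2 N 0).1 0).2.toNat,
      by omega, by omega, by omega, by omega, ?_⟩
    rw [h, one_mul] at i3a
    have : ((funcLoop3 (funcLoop2 N 0).1 0).2 - 0).toNat = (funcLoop3 (funcLoop2 N 0).1 0).2.toNat := by omega
    rw [this] at i3a
    have h2' : ((funcLoop2 N 0).2 - 0).toNat = (funcLoop2 N 0).2.toNat := by omega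
    rw [h2'] at i2a
    calc (2:Int) ^ (funcLoop2 N 0).2.toNat * 3 ^ (funcLoop3 (funcLoop2 N 0).1 0).2.toNat
        = 3 ^ (funcLoop3 (funcLoop2 N 0).1 0).2.toNat * 2 ^ (funcLoop2 N 0).2.toNat := by ring
      _ = (funcLoop2 N 0).1 * 2 ^ (funcLoop2 N 0).2.toNat := by rw [i3a]
      _ = N := i2a
  · rintro ⟨a, b, h3, h11, h2, h9, heq⟩
    have hM2 : ¬ ((2:Int) ∣ 3 ^ b) := by
      intro hd
      have := Int.prime_two.dvd_of_dvd_pow hd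
      omega
    have hM3 : ¬ ((3:Int) ∣ 1) := by intro ⟨c, hc⟩; omega
    have e2 : funcLoop2 N 0 = (3 ^ b, (a : Int)) := by
      have := funcLoop2_shift a (3 ^ b) 0 hM2 (by omega)
      rw [← heq]
      rw [show (2:Int) ^ a * 3 ^ b = 3 ^ b * 2 ^ a by ring, this]; simp
    have e3 : funcLoop3 (3 ^ b : Int) 0 = (1, (b : Int)) := by
      have := funcLoop3_shift b 1 0 hM3 (by omega)
      rw [one_mul] at this
      rw [this]; simp
    simp only [func, e2, e3]
    rw [if_neg (by rw [not_not]; constructor <;> omega), if_neg (by rw [not_not]; constructor <;> omega)]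
    simp

-- ===== VERDICT (by name: the statement is the Claim_ definition above) =====
theorem func_spec : Claim_equal_func := by
  intro N _
  unfold Spec_func
  exact Bool.eq_iff_iff.mpr ((func_iff N).trans (func_alt_iff N).symm)
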